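-- pv_equiv track=rewrite | github.com/Akgop/Problem-Solving | Backtracking/programmers_weekly3.py | check
-- ===== SOURCE A (Python) =====
-- def turn_right(a):
--     row_length = len(a)
--     column_length = len(a[0])
--     result = [[0] * row_length for _ in range(column_length)]
--     for r in range(row_length):
--         for c in range(column_length):
--             result[c][row_length - 1 - r] = a[r][c]
--     return result
--
-- def check(board, table, size):
--     result = 0
--     if not board or not table:
--         return result
--
--     flag = False
--     used = [False] * len(table)
--     for i in range(len(board)):
--         for j in range(len(table)):
--             if used[j]:
--                 continue
--             for r in range(4):
--                 if board[i] == table[j]: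
--                     used[j] = True
--                     result += size
--                     flag = True
--                     break
--                 table[j] = turn_right(table[j])
--             if flag:
--                 flag = False
--                 break
--     return result
-- ===== SOURCE B (Python) =====
-- def check(board, table, size):
--     def rot(p):
--         return [[row[c] for row in reversed(p)] for c in range(len(p[0]))]
--
--     def rect(p):
--         return bool(p) and bool(p[0]) and all(len(row) == len(p[0]) for row in p)
--
--     def key(p):
--         q1 = rot(p)
--         q2 = rot(q1)
--         q3 = rot(q2)
--         best = p
--         for q in (q1, q2, q3):
--             if q < best:
--                 best = q
--         return tuple(tuple(row) for row in best)
--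
--     buckets = {}
--     for j in range(len(table)):
--         t = table[j]
--         if rect(t):
--             buckets.setdefault(key(t), []).append(j)
--
--     result = 0
--     for b in board:
--         if not rect(b):
--             continue
--         lst = buckets.get(key(b))
--         if lst:
--             lst.pop(0)
--             result += size
--     return result
-- ===== Notes on version B (the rewrite author's own statement) =====
-- stated objective: faster
-- what changed: B hashes each piece once by a canonical rotation form (lexicographic minimum of its four rotations) into a dict of index buckets and pops the smallest available index per board piece, instead of A's nested scan that re-rotates every unused table piece up to four times for every board piece; B also does not mutate the table argument.
-- outside the precondition, e.g. on check([[]], [[]], 2): A returns 2, B returns 0; on check([[[2, 1]]], [[[1], [2, 9]]], 5): A returns 5, B returns 0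
import Mathlib
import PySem

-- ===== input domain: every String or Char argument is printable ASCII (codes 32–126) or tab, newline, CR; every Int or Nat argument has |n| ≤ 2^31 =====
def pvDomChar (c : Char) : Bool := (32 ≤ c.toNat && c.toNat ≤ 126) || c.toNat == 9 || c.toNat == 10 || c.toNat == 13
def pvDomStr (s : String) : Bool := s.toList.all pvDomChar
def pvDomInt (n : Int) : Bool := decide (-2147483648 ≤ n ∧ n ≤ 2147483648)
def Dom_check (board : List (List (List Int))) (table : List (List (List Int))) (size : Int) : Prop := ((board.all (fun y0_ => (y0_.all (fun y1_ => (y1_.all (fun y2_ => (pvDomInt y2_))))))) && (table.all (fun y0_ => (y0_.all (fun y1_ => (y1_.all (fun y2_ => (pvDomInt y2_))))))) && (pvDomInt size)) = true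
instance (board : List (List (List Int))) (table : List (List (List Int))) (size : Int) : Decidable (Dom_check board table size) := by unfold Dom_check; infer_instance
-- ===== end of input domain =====

-- ===== PORT A =====
-- B replaces A's per-pair re-rotation scan by a one-shot canonical-rotation hash of the table
-- with index buckets (objective: faster). Note: the Python A mutates `table` in place (its
-- rotations persist); the equivalence proved here is about the return value only, with the
-- table state threaded explicitly through the port.

-- port of turn_right; `len(a[0])` raises IndexError on a = [] in Python (unreachable from
-- `check` under Pre_check), the port reads `headD []` there
def turn_right (a : List (List Int)) : List (List Int) :=
  let m := a.length
  let n := (a.headD []).length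
  (List.range m).foldl (fun result r =>
    (List.range n).foldl (fun result c =>
      result.modify c (fun row => row.set (m - 1 - r) ((a.getD r []).getD c 0))) result)
    (List.replicate n (List.replicate m 0))

-- the `for r in range(4)` loop: compare, else rotate in place; returns the break flag and
-- the final state of table[j]
def tryRots : Nat → List (List Int) → List (List Int) → Bool × List (List Int)
  | 0, _, t => (false, t)
  | r+1, b, t => if b = t then (true, t) else tryRots r b (turn_right t)

-- the `for j in range(len(table))` loop with its `continue`/`break` (flag) structure
def scanJ (b : List (List Int)) (size : Int) :
    List Nat → List (List (List Int)) × List Bool × Int → List (List (List Int)) × List Bool × Int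
  | [], st => st
  | j :: js, (tbl, used, res) =>
    if used.getD j false then scanJ b size js (tbl, used, res)
    else
      let p := tryRots 4 b (tbl.getD j [])
      if p.1 then (tbl.set j p.2, used.set j true, res + size)
      else scanJ b size js (tbl.set j p.2, used, res)

def check (board : List (List (List Int))) (table : List (List (List Int))) (size : Int) : Int :=
  if board = [] ∨ table = [] then 0
  else (board.foldl (fun st bp => scanJ bp size (List.range table.length) st)
        (table, List.replicate table.length false, (0 : Int))).2.2

-- ===== PORT B =====
-- rot: [[row[c] for row in reversed(p)] for c in range(len(p[0]))]; B only calls it on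
-- rect pieces, where row[c] is always in range, so `getD c 0` is exact there
def rotB (p : List (List Int)) : List (List Int) :=
  (List.range (p.headD []).length).map (fun c => p.reverse.map (fun row => row.getD c 0))

def rectB (p : List (List Int)) : Bool :=
  !p.isEmpty && !(p.headD []).isEmpty && p.all (fun row => row.length == (p.headD []).length)

-- canonical form: lexicographic minimum of the four rotations (Python compares the nested
-- lists; Source B's final tuple-of-tuples conversion is only for hashability and keeps the data)
def keyB (p : List (List Int)) : List (List Int) :=
  let q1 := rotB p
  let q2 := rotB q1
  let q3 := rotB q2
  [q1, q2, q3].foldl (fun best q => if q < best then q else best) p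

def check_alt (board : List (List (List Int))) (table : List (List (List Int))) (size : Int) : Int :=
  let buckets := (List.range table.length).foldl
    (fun d j =>
      let t := table.getD j []
      if rectB t then d.modify (keyB t) [] (· ++ [j]) else d)
    PySem.Dict.empty
  -- `lst = buckets.get(key(b)); if lst:` — a missing key and an emptied bucket are both
  -- falsy, so `getD _ []` is exact; `lst.pop(0)` is the in-place tail
  (board.foldl (fun st b =>
      if rectB b then
        match st.1.getD (keyB b) [] with
        | [] => st
        | _ :: tl => (st.1.insert (keyB b) tl, st.2 + size)
      else st)
    (buckets, (0 : Int))).2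

-- ===== PRECONDITION & SPEC =====
-- p is a well-formed (nonempty, rectangular) piece
abbrev RectP (p : List (List Int)) : Prop :=
  p ≠ [] ∧ (p.headD []) ≠ [] ∧ ∀ row ∈ p, row.length = (p.headD []).length

-- a piece A's turn_right accepts without raising: every row at least as long as the first
abbrev SafeP (t : List (List Int)) : Prop :=
  t ≠ [] ∧ (t.headD []) ≠ [] ∧ ∀ row ∈ t, (t.headD []).length ≤ row.length

-- b is not a rectangle whose dimensions fit t's first-row rectangle in either orientation
abbrev NoDims (b t : List (List Int)) : Prop :=
  ¬ (RectP b ∧ ((b.length = t.length ∧ (b.headD []).length = (t.headD []).length) ∨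
                (b.length = (t.headD []).length ∧ (b.headD []).length = t.length)))

-- Pre_ excludes (with board and table nonempty) tables with a piece whose first row is
-- longer than a later row or empty (A's turn_right raises IndexError on rotation there),
-- and board pieces that coincide with a non-rectangular table piece or with the dimensions
-- of its first-row truncation: there A's value comes from lossily rotating an ill-formed
-- piece (cells silently dropped), while B's natural reading is that a non-rectangular
-- piece matches nothing.
def Pre_check (board : List (List (List Int))) (table : List (List (List Int))) (size : Int) : Prop :=
  board = [] ∨ table = [] ∨
    ((∀ t ∈ table, SafeP t) ∧ ∀ bp ∈ board, ∀ t ∈ table, ¬ RectP t → bp ≠ t ∧ NoDims bp t)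

instance (board : List (List (List Int))) (table : List (List (List Int))) (size : Int) :
    Decidable (Pre_check board table size) := by unfold Pre_check; infer_instance

def pvWitness_check : List (List (List Int)) × List (List (List Int)) × Int :=
  ([[[1, 2]]], [[[2], [1]], [[3, 4], [5, 6]]], 7)

def Spec_check (board : List (List (List Int))) (table : List (List (List Int))) (size : Int) (out : Int) : Prop := out = check_alt board table size
instance (board : List (List (List Int))) (table : List (List (List Int))) (size : Int) (out : Int) : Decidable (Spec_check board table size out) := by unfold Spec_check; infer_instance

-- ===== CLAIM (what is proved, stated in full; the proofs are below) =====
def Claim_equal_check : Prop := ∀ (board : List (List (List Int))) (table : List (List (List Int))) (size : Int), Dom_check board table size → Pre_check board table size → Spec_check board table size (check board table size)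

-- ===== LEMMAS AND PROOFS =====

-- abbreviations for the dimensions of a piece
def pM (p : List (List Int)) : Nat := p.length
def pN (p : List (List Int)) : Nat := (p.headD []).length

lemma headD_eq_getD_zero {α : Type} (l : List α) (d : α) : l.headD d = l.getD 0 d := by
  cases l <;> rfl

lemma ext_getD {α : Type} (d : α) {l1 l2 : List α} (h : l1.length = l2.length)
    (he : ∀ i, i < l1.length → l1.getD i d = l2.getD i d) : l1 = l2 := by
  apply List.ext_getElem h
  intro i h1 h2
  have := he i h1
  simpa [List.getD_eq_getElem?_getD, List.getElem?_eq_getElem, h1, h2] using this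

lemma rectB_iff (p : List (List Int)) : rectB p = true ↔ RectP p := by
  simp only [rectB, RectP, Bool.and_eq_true, Bool.not_eq_true', List.isEmpty_eq_false_iff, List.all_eq_true, beq_iff_eq]
  constructor
  · rintro ⟨⟨h1, h2⟩, h3⟩; exact ⟨h1, h2, h3⟩
  · rintro ⟨h1, h2, h3⟩; exact ⟨⟨h1, h2⟩, h3⟩

-- ---- rotB characterization ----
lemma rotB_length (p : List (List Int)) : (rotB p).length = pN p := by
  simp [rotB, pN]

lemma rotB_row (p : List (List Int)) {c : Nat} (hc : c < pN p) :
    (rotB p).getD c [] = p.reverse.map (fun row => row.getD c 0) := by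
  have hc2 : c < (List.range (p.headD []).length).length := by simpa [pN] using hc
  rw [rotB, List.getD_eq_getElem?_getD, List.getElem?_map]
  rw [List.getElem?_eq_getElem hc2]
  simp

lemma rotB_row_length (p : List (List Int)) {c : Nat} (hc : c < pN p) :
    ((rotB p).getD c []).length = pM p := by
  rw [rotB_row p hc]
  simp [pM]

lemma rotB_entry (p : List (List Int)) {c k : Nat} (hc : c < pN p) (hk : k < pM p) :
    ((rotB p).getD c []).getD k 0 = (p.getD (pM p - 1 - k) []).getD c 0 := by
  rw [rotB_row p hc]
  have hk' : k < p.reverse.length := by simpa [pM] using hk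
  have hmk : pM p - 1 - k < p.length := by simp [pM] at hk ⊢; omega
  rw [List.getD_eq_getElem?_getD, List.getElem?_map, List.getElem?_eq_getElem hk']
  simp only [Option.map_some, Option.getD_some, List.getElem_reverse]
  rw [List.getD_eq_getElem?_getD (l := p), List.getElem?_eq_getElem hmk]
  simp [pM]

lemma length_pos_of_rect {p : List (List Int)} (hp : RectP p) : 0 < pM p ∧ 0 < pN p := by
  obtain ⟨h1, h2, _⟩ := hp
  constructor
  · simpa [pM, List.length_pos_iff] using h1
  · simpa [pN, List.length_pos_iff] using h2

lemma rotB_rect {p : List (List Int)} (hp : RectP p) :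
    RectP (rotB p) ∧ pM (rotB p) = pN p ∧ pN (rotB p) = pM p := by
  obtain ⟨hm, hn⟩ := length_pos_of_rect hp
  have hlen : pM (rotB p) = pN p := rotB_length p
  have hhead : pN (rotB p) = pM p := by
    have := rotB_row_length p (c := 0) hn
    rw [pN, headD_eq_getD_zero]
    exact this
  refine ⟨⟨?_, ?_, ?_⟩, hlen, hhead⟩
  · intro h; rw [← List.length_eq_zero_iff] at h; rw [pM] at hlen; omega
  · intro h
    have : pN (rotB p) = 0 := by rw [pN, h]; rfl
    omega
  · intro row hrow
    rw [rotB] at hrow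
    simp only [List.mem_map, List.mem_range] at hrow
    obtain ⟨c, hc, rfl⟩ := hrow
    rw [← pN]
    rw [hhead]
    simp [pM]

lemma getD_row_length {p : List (List Int)} (hp : RectP p) {i : Nat} (hi : i < pM p) :
    (p.getD i []).length = pN p := by
  have hmem : p.getD i [] ∈ p := by
    rw [List.getD_eq_getElem?_getD, List.getElem?_eq_getElem (by simpa [pM] using hi)]
    exact List.getElem_mem _
  exact hp.2.2 _ hmem

lemma rotB_four {p : List (List Int)} (hp : RectP p) :
    rotB (rotB (rotB (rotB p))) = p := by
  obtain ⟨hm, hn⟩ := length_pos_of_rect hp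
  have r1rect := (rotB_rect hp).1
  have r2rect := (rotB_rect r1rect).1
  have r3rect := (rotB_rect r2rect).1
  have e1 : pN (rotB (rotB (rotB p))) = pM (rotB (rotB p)) := (rotB_rect r2rect).2.2
  have e2 : pM (rotB (rotB p)) = pN (rotB p) := (rotB_rect r1rect).2.1
  have e3 : pN (rotB p) = pM p := (rotB_rect hp).2.2
  have f1 : pM (rotB (rotB (rotB p))) = pN (rotB (rotB p)) := (rotB_rect r2rect).2.1
  have f2 : pN (rotB (rotB p)) = pM (rotB p) := (rotB_rect r1rect).2.2
  have f3 : pM (rotB p) = pN p := (rotB_rect hp).2.1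
  apply ext_getD []
  · rw [rotB_length, e1, e2, e3]; rfl
  · intro i hil
    have hi : i < pM p := by rwa [rotB_length, e1, e2, e3] at hil
    apply ext_getD (0 : Int)
    · rw [rotB_row_length _ (by rw [e1, e2, e3]; exact hi)]
      rw [f1, f2, f3]
      exact (getD_row_length hp hi).symm
    · intro j hjl
      have hj : j < pN p := by
        rwa [rotB_row_length _ (by rw [e1, e2, e3]; exact hi), f1, f2, f3] at hjl
      rw [rotB_entry _ (by rw [e1, e2, e3]; exact hi) (by rw [f1, f2, f3]; exact hj)]
      rw [f1, f2, f3]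
      rw [rotB_entry _ (by rw [f2, f3]; omega) (by rw [e2, e3]; exact hi)]
      rw [e2, e3]
      rw [rotB_entry _ (by rw [e3]; omega) (by rw [f3]; omega)]
      rw [f3]
      have g1 : pN p - 1 - (pN p - 1 - j) = j := by omega
      rw [g1]
      rw [rotB_entry _ hj (by omega)]
      have g2 : pM p - 1 - (pM p - 1 - i) = i := by omega
      rw [g2]

-- ---- turn_right = rotB (the imperative fill equals the comprehension) ----
lemma inner_foldl_length (g : Nat → List Int → List Int) (nn : Nat) (res : List (List Int)) :
    ((List.range nn).foldl (fun r c => r.modify c (g c)) res).length = res.length := by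
  induction nn generalizing res with
  | zero => simp
  | succ n ih =>
    rw [List.range_succ, List.foldl_append]
    simp [List.foldl, List.length_modify, ih]

lemma inner_foldl_getD (g : Nat → List Int → List Int) (nn : Nat) (res : List (List Int))
    (c : Nat) (hc : c < res.length) :
    ((List.range nn).foldl (fun r c => r.modify c (g c)) res).getD c [] =
    if c < nn then g c (res.getD c []) else res.getD c [] := by
  induction nn with
  | zero => simp
  | succ n ih =>
    rw [List.range_succ, List.foldl_append]
    simp only [List.foldl]
    set X := (List.range n).foldl (fun r c => r.modify c (g c)) res with hX
    have hXlen : X.length = res.length := inner_foldl_length g n res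
    rw [List.getD_eq_getElem?_getD, List.getElem?_modify]
    by_cases h : n = c
    · subst h
      have hlt : n < X.length := by omega
      have hv : X.getD n [] = res.getD n [] := by rw [ih]; simp
      rw [List.getD_eq_getElem?_getD, List.getElem?_eq_getElem hlt] at hv
      simp only [Option.getD_some] at hv
      rw [List.getElem?_eq_getElem hlt]
      simp [hv]
    · have : (fun a => if n = c then g n a else a) <$> X[c]? = X[c]? := by
        simp [h]
      rw [this, ← List.getD_eq_getElem?_getD, ih]
      by_cases h2 : c < n
      · simp [h2, Nat.lt_succ_of_lt h2]
      · have h3 : ¬ c < n + 1 := by omega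
        simp [h2, h3]

lemma outer_length (a : List (List Int)) (R : Nat) :
    ((List.range R).foldl (fun result r =>
      (List.range (pN a)).foldl (fun result c =>
        result.modify c (fun row => row.set (pM a - 1 - r) ((a.getD r []).getD c 0))) result)
      (List.replicate (pN a) (List.replicate (pM a) 0))).length = pN a := by
  induction R with
  | zero => simp
  | succ n ih =>
    rw [List.range_succ, List.foldl_append]
    simp only [List.foldl]
    rw [inner_foldl_length]
    exact ih

lemma outer_row (a : List (List Int)) (R : Nat) (hR : R ≤ pM a) (c : Nat) (hc : c < pN a) :
    ((List.range R).foldl (fun result r =>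
      (List.range (pN a)).foldl (fun result c =>
        result.modify c (fun row => row.set (pM a - 1 - r) ((a.getD r []).getD c 0))) result)
      (List.replicate (pN a) (List.replicate (pM a) 0))).getD c [] =
    (List.range (pM a)).map
      (fun k => if pM a - R ≤ k then (a.getD (pM a - 1 - k) []).getD c 0 else 0) := by
  induction R with
  | zero =>
    simp only [List.range_zero, List.foldl_nil]
    rw [List.getD_replicate _ hc]
    apply List.ext_getElem
    · simp
    · intro i h1 h2
      simp only [List.getElem_replicate, List.getElem_map, List.getElem_range]
      have hni : ¬ pM a ≤ i := by simp at h1; omega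
      simp [hni]
  | succ n ih =>
    have hn : n ≤ pM a := by omega
    rw [List.range_succ, List.foldl_append]
    simp only [List.foldl]
    rw [inner_foldl_getD _ _ _ c (by rw [outer_length]; exact hc)]
    simp only [hc, if_pos]
    rw [ih hn]
    apply List.ext_getElem
    · simp
    · intro i h1 h2
      simp only [List.length_set, List.length_map, List.length_range] at h1 h2
      rw [List.getElem_set]
      simp only [List.getElem_map, List.getElem_range]
      by_cases h : pM a - 1 - n = i
      · have e1 : pM a - 1 - i = n := by omega
        have e2 : pM a - (n + 1) ≤ i := by omega
        simp [h, e1, e2]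
      · have e3 : (pM a - (n + 1) ≤ i) ↔ (pM a - n ≤ i) := by omega
        simp [h, e3]

lemma turn_right_eq (a : List (List Int)) :
    turn_right a = (List.range (pM a)).foldl (fun result r =>
      (List.range (pN a)).foldl (fun result c =>
        result.modify c (fun row => row.set (pM a - 1 - r) ((a.getD r []).getD c 0))) result)
      (List.replicate (pN a) (List.replicate (pM a) 0)) := rfl

lemma turn_right_eq_rotB (a : List (List Int)) : turn_right a = rotB a := by
  rw [turn_right_eq]
  apply ext_getD []
  · rw [outer_length, rotB_length]
  · intro c hcl
    have hc : c < pN a := by rwa [outer_length] at hcl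
    rw [outer_row a (pM a) le_rfl c hc, rotB_row a hc]
    apply ext_getD (0 : Int)
    · simp [pM]
    · intro k hkl
      have hk : k < pM a := by simpa using hkl
      have hk1 : k < (List.range (pM a)).length := by simpa using hk
      have hk2 : k < a.reverse.length := by simpa [pM] using hk
      rw [List.getD_eq_getElem?_getD, List.getElem?_map, List.getElem?_eq_getElem hk1]
      rw [List.getD_eq_getElem?_getD, List.getElem?_map, List.getElem?_eq_getElem hk2]
      simp only [Option.map_some, Option.getD_some, List.getElem_range, List.getElem_reverse]
      have hlt : a.length - 1 - k < a.length := by simp [pM] at hk; omega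
      have e : a.getD (pM a - 1 - k) [] = a[a.length - 1 - k] := by
        show a.getD (a.length - 1 - k) [] = _
        rw [List.getD_eq_getElem?_getD, List.getElem?_eq_getElem hlt]
        simp
      rw [if_pos (by omega), e]

-- ---- canonical key ----
lemma minStep (q acc : List (List Int)) : (if q < acc then q else acc) = min acc q := by
  rcases lt_or_ge q acc with h|h
  · simp [h, min_eq_right h.le]
  · simp [not_lt.mpr h, min_eq_left h]

lemma keyB_min (p : List (List Int)) :
    keyB p = min (min (min p (rotB p)) (rotB (rotB p))) (rotB (rotB (rotB p))) := by
  show (if rotB (rotB (rotB p)) < (if rotB (rotB p) < (if rotB p < p then rotB p else p)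
      then rotB (rotB p) else (if rotB p < p then rotB p else p))
    then rotB (rotB (rotB p))
    else (if rotB (rotB p) < (if rotB p < p then rotB p else p)
      then rotB (rotB p) else (if rotB p < p then rotB p else p))) = _
  rw [minStep, minStep, minStep]

lemma keyB_mem (p : List (List Int)) :
    keyB p = p ∨ keyB p = rotB p ∨ keyB p = rotB (rotB p) ∨ keyB p = rotB (rotB (rotB p)) := by
  rw [keyB_min]
  rcases min_choice (min (min p (rotB p)) (rotB (rotB p))) (rotB (rotB (rotB p))) with h|h <;>
    rw [h]
  · rcases min_choice (min p (rotB p)) (rotB (rotB p)) with h2|h2 <;> rw [h2]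
    · rcases min_choice p (rotB p) with h3|h3 <;> rw [h3]
      · exact Or.inl rfl
      · exact Or.inr (Or.inl rfl)
    · exact Or.inr (Or.inr (Or.inl rfl))
  · exact Or.inr (Or.inr (Or.inr rfl))

lemma min_rot4 (w x y z : List (List Int)) :
    min (min (min x y) z) w = min (min (min w x) y) z := by
  simp [min_comm, min_left_comm]

lemma keyB_shift {p : List (List Int)} (hp : RectP p) : keyB (rotB p) = keyB p := by
  rw [keyB_min, keyB_min, rotB_four hp]
  exact min_rot4 p (rotB p) (rotB (rotB p)) (rotB (rotB (rotB p)))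

abbrev orb (b t : List (List Int)) : Prop :=
  b = t ∨ b = rotB t ∨ b = rotB (rotB t) ∨ b = rotB (rotB (rotB t))

lemma canon_iff {t : List (List Int)} (ht : RectP t) (b : List (List Int)) :
    orb b t ↔ (RectP b ∧ keyB b = keyB t) := by
  constructor
  · intro h
    rcases h with rfl|rfl|rfl|rfl
    · exact ⟨ht, rfl⟩
    · exact ⟨(rotB_rect ht).1, keyB_shift ht⟩
    · exact ⟨(rotB_rect (rotB_rect ht).1).1,
        (keyB_shift (rotB_rect ht).1).trans (keyB_shift ht)⟩
    · exact ⟨(rotB_rect (rotB_rect (rotB_rect ht).1).1).1,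
        ((keyB_shift (rotB_rect (rotB_rect ht).1).1).trans
          (keyB_shift (rotB_rect ht).1)).trans (keyB_shift ht)⟩
  · rintro ⟨hb, hk⟩
    have rot4b := rotB_four hb
    have rot4t := rotB_four ht
    rcases keyB_mem b with e1|e1|e1|e1 <;> rcases keyB_mem t with e2|e2|e2|e2 <;>
      have h := (e1.symm.trans hk).trans e2
    · exact Or.inl h
    · exact Or.inr (Or.inl h)
    · exact Or.inr (Or.inr (Or.inl h))
    · exact Or.inr (Or.inr (Or.inr h))
    · -- rotB b = t
      have h3 := congrArg (fun x => rotB (rotB (rotB x))) h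
      simp only at h3
      rw [rot4b] at h3
      exact Or.inr (Or.inr (Or.inr h3))
    · have h3 := congrArg (fun x => rotB (rotB (rotB x))) h
      simp only at h3
      rw [rot4b, rot4t] at h3
      exact Or.inl h3
    · have h3 := congrArg (fun x => rotB (rotB (rotB x))) h
      simp only at h3
      rw [rot4b, rot4t] at h3
      exact Or.inr (Or.inl h3)
    · have h3 := congrArg (fun x => rotB (rotB (rotB x))) h
      simp only at h3
      rw [rot4b, rot4t] at h3
      exact Or.inr (Or.inr (Or.inl h3))
    · -- rotB (rotB b) = t
      have h3 := congrArg (fun x => rotB (rotB x)) h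
      simp only at h3
      rw [rot4b] at h3
      exact Or.inr (Or.inr (Or.inl h3))
    · have h3 := congrArg (fun x => rotB (rotB x)) h
      simp only at h3
      rw [rot4b] at h3
      exact Or.inr (Or.inr (Or.inr h3))
    · have h3 := congrArg (fun x => rotB (rotB x)) h
      simp only at h3
      rw [rot4b, rot4t] at h3
      exact Or.inl h3
    · have h3 := congrArg (fun x => rotB (rotB x)) h
      simp only at h3
      rw [rot4b, rot4t] at h3
      exact Or.inr (Or.inl h3)
    · -- rotB (rotB (rotB b)) = t
      have h3 := congrArg (fun x => rotB x) h
      simp only at h3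
      rw [rot4b] at h3
      exact Or.inr (Or.inl h3)
    · have h3 := congrArg (fun x => rotB x) h
      simp only at h3
      rw [rot4b] at h3
      exact Or.inr (Or.inr (Or.inl h3))
    · have h3 := congrArg (fun x => rotB x) h
      simp only at h3
      rw [rot4b] at h3
      exact Or.inr (Or.inr (Or.inr h3))
    · have h3 := congrArg (fun x => rotB x) h
      simp only at h3
      rw [rot4b, rot4t] at h3
      exact Or.inl h3

-- ---- tryRots characterization ----
lemma tryRots_fst (t b : List (List Int)) :
    (tryRots 4 b t).1 = decide (orb b t) := by
  simp only [show (4:Nat) = 3+1 from rfl, tryRots, turn_right_eq_rotB]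
  by_cases h1 : b = t <;> by_cases h2 : b = rotB t <;>
    by_cases h3 : b = rotB (rotB t) <;> by_cases h4 : b = rotB (rotB (rotB t)) <;>
    simp [tryRots, h1, h2, h3, h4, orb, turn_right_eq_rotB] <;> (try (split_ifs <;> rfl))

def truncP (t : List (List Int)) : List (List Int) :=
  t.map (fun row => row.take (t.headD []).length)

lemma trunc_of_rect {t : List (List Int)} (ht : RectP t) : truncP t = t := by
  rw [truncP]
  conv_rhs => rw [← List.map_id t]
  apply List.map_congr_left
  intro row hrow
  rw [← ht.2.2 row hrow, List.take_length]
  rfl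

lemma rect_safe {t : List (List Int)} (ht : RectP t) : SafeP t :=
  ⟨ht.1, ht.2.1, fun row hrow => le_of_eq (ht.2.2 row hrow).symm⟩

lemma trunc_rect {t : List (List Int)} (ht : SafeP t) : RectP (truncP t) := by
  obtain ⟨h1, h2, h3⟩ := ht
  have hhead : (truncP t).headD [] = (t.headD []).take (t.headD []).length := by
    cases t with
    | nil => exact absurd rfl h1
    | cons r0 rest => rfl
  rw [List.take_length] at hhead
  refine ⟨?_, by rw [hhead]; exact h2, ?_⟩
  · cases t with
    | nil => exact absurd rfl h1
    | cons r0 rest => simp [truncP]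
  · intro row hrow
    rw [truncP] at hrow
    simp only [List.mem_map] at hrow
    obtain ⟨row0, hmem, rfl⟩ := hrow
    rw [hhead, List.length_take]
    exact Nat.min_eq_left (h3 row0 hmem)

lemma trunc_dims {t : List (List Int)} (ht : SafeP t) :
    pM (truncP t) = pM t ∧ pN (truncP t) = pN t := by
  constructor
  · simp [truncP, pM]
  · obtain ⟨h1, h2, h3⟩ := ht
    cases t with
    | nil => exact absurd rfl h1
    | cons r0 rest =>
      show (r0.take ((r0 :: rest).headD []).length).length = _
      simp [pN]

lemma rotB_safe_eq {t : List (List Int)} (ht : SafeP t) : rotB t = rotB (truncP t) := by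
  have hN : pN (truncP t) = pN t := (trunc_dims ht).2
  rw [rotB, rotB]
  rw [show ((truncP t).headD []).length = ((t.headD []).length) from hN]
  apply List.map_congr_left
  intro c hc
  have hcn : c < (t.headD []).length := by simpa using hc
  rw [truncP, ← List.map_reverse]
  rw [List.map_map]
  apply List.map_congr_left
  intro row hrow
  simp only [Function.comp_apply]
  rw [List.getD_eq_getElem?_getD, List.getD_eq_getElem?_getD, List.getElem?_take_of_lt hcn]

-- orb b t with t rectangular forces b rectangular
lemma orb_rect {t b : List (List Int)} (ht : RectP t) (h : orb b t) : RectP b := by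
  rcases h with rfl|rfl|rfl|rfl
  · exact ht
  · exact (rotB_rect ht).1
  · exact (rotB_rect (rotB_rect ht).1).1
  · exact (rotB_rect (rotB_rect (rotB_rect ht).1).1).1

-- the dimensions of the four rotations of a rectangle u, as (pM, pN) pairs
lemma rot_dims {u : List (List Int)} (hu : RectP u) :
    (pM (rotB u) = pN u ∧ pN (rotB u) = pM u) ∧
    (pM (rotB (rotB u)) = pM u ∧ pN (rotB (rotB u)) = pN u) ∧
    (pM (rotB (rotB (rotB u))) = pN u ∧ pN (rotB (rotB (rotB u))) = pM u) := by
  obtain ⟨h1, e1, f1⟩ := rotB_rect hu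
  obtain ⟨h2, e2, f2⟩ := rotB_rect h1
  obtain ⟨h3, e3, f3⟩ := rotB_rect h2
  exact ⟨⟨e1, f1⟩, ⟨by rw [e2, f1], by rw [f2, e1]⟩, ⟨by rw [e3, f2, e1], by rw [f3, e2, f1]⟩⟩

-- under NoDims, b matches neither a safe non-rectangular piece nor its truncation
lemma no_orb_orig {t b : List (List Int)} (ht : SafeP t) (hne : b ≠ t) (hnd : NoDims b t) :
    ¬ orb b t := by
  have hu : RectP (truncP t) := trunc_rect ht
  obtain ⟨eM, eN⟩ := trunc_dims ht
  obtain ⟨⟨a1, a2⟩, ⟨b1, b2⟩, ⟨c1, c2⟩⟩ := rot_dims hu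
  simp only [pM, pN] at eM eN a1 a2 b1 b2 c1 c2
  intro h
  rcases h with rfl|he|he|he
  · exact hne rfl
  · rw [rotB_safe_eq ht] at he
    exact hnd ⟨by rw [he]; exact (rotB_rect hu).1, Or.inr ⟨by rw [he]; omega, by rw [he]; omega⟩⟩
  · rw [rotB_safe_eq ht] at he
    exact hnd ⟨by rw [he]; exact (rotB_rect (rotB_rect hu).1).1,
      Or.inl ⟨by rw [he]; omega, by rw [he]; omega⟩⟩
  · rw [rotB_safe_eq ht] at he
    exact hnd ⟨by rw [he]; exact (rotB_rect (rotB_rect (rotB_rect hu).1).1).1,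
      Or.inr ⟨by rw [he]; omega, by rw [he]; omega⟩⟩

lemma no_orb_trunc {t b : List (List Int)} (ht : SafeP t) (hnd : NoDims b t) :
    ¬ orb b (truncP t) := by
  have hu : RectP (truncP t) := trunc_rect ht
  obtain ⟨eM, eN⟩ := trunc_dims ht
  obtain ⟨⟨a1, a2⟩, ⟨b1, b2⟩, ⟨c1, c2⟩⟩ := rot_dims hu
  simp only [pM, pN] at eM eN a1 a2 b1 b2 c1 c2
  intro h
  rcases h with he|he|he|he
  · exact hnd ⟨by rw [he]; exact hu, Or.inl ⟨by rw [he]; omega, by rw [he]; omega⟩⟩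
  · exact hnd ⟨by rw [he]; exact (rotB_rect hu).1, Or.inr ⟨by rw [he]; omega, by rw [he]; omega⟩⟩
  · exact hnd ⟨by rw [he]; exact (rotB_rect (rotB_rect hu).1).1,
      Or.inl ⟨by rw [he]; omega, by rw [he]; omega⟩⟩
  · exact hnd ⟨by rw [he]; exact (rotB_rect (rotB_rect (rotB_rect hu).1).1).1,
      Or.inr ⟨by rw [he]; omega, by rw [he]; omega⟩⟩

lemma tryRots_snd {t : List (List Int)} (ht : SafeP t) (b : List (List Int)) (h : ¬ orb b t) :
    (tryRots 4 b t).2 = truncP t := by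
  have h1 : b ≠ t := fun e => h (Or.inl e)
  have h2 : b ≠ rotB t := fun e => h (Or.inr (Or.inl e))
  have h3 : b ≠ rotB (rotB t) := fun e => h (Or.inr (Or.inr (Or.inl e)))
  have h4 : b ≠ rotB (rotB (rotB t)) := fun e => h (Or.inr (Or.inr (Or.inr e)))
  simp only [show (4:Nat) = 3+1 from rfl, tryRots, turn_right_eq_rotB]
  simp [tryRots, h1, h2, h3, h4, turn_right_eq_rotB]
  rw [rotB_safe_eq ht]
  exact rotB_four (trunc_rect ht)

-- getD/set helpers
lemma getD_set_self {α : Type} (l : List α) {j : Nat} (h : j < l.length) (a d : α) :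
    (l.set j a).getD j d = a := by
  simp [List.getD_eq_getElem?_getD, List.getElem?_set_self h]

lemma getD_set_ne {α : Type} (l : List α) {i j : Nat} (h : j ≠ i) (a d : α) :
    (l.set j a).getD i d = l.getD i d := by
  simp [List.getD_eq_getElem?_getD, List.getElem?_set_ne h]

-- ---- scanJ characterization ----
lemma getD_mem {α : Type} (l : List α) (d : α) {j : Nat} (h : j < l.length) :
    l.getD j d ∈ l := by
  rw [List.getD_eq_getElem?_getD, List.getElem?_eq_getElem h]
  exact List.getElem_mem _

lemma scanJ_char (T : List (List (List Int))) (hT : ∀ t ∈ T, SafeP t)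
    (b : List (List Int)) (size : Int)
    (hcb : ∀ j, j < T.length → ¬ RectP (T.getD j []) →
      b ≠ T.getD j [] ∧ NoDims b (T.getD j [])) :
    ∀ (js : List Nat) (tbl : List (List (List Int))) (used : List Bool) (res : Int),
    (∀ j ∈ js, j < T.length) →
    tbl.length = T.length →
    used.length = T.length →
    (∀ j, j < T.length → used.getD j false = false →
      tbl.getD j [] = T.getD j [] ∨ tbl.getD j [] = truncP (T.getD j [])) →
    (match (js.filter (fun j => !(used.getD j false) && rectB (T.getD j []) &&
        decide (orb b (T.getD j [])))).head? with
     | none => (scanJ b size js (tbl, used, res)).2.1 = used ∧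
               (scanJ b size js (tbl, used, res)).2.2 = res
     | some j => (scanJ b size js (tbl, used, res)).2.1 = used.set j true ∧
                 (scanJ b size js (tbl, used, res)).2.2 = res + size) ∧
    (scanJ b size js (tbl, used, res)).1.length = T.length ∧
    (∀ j, j < T.length → (scanJ b size js (tbl, used, res)).2.1.getD j false = false →
      (scanJ b size js (tbl, used, res)).1.getD j [] = T.getD j [] ∨
      (scanJ b size js (tbl, used, res)).1.getD j [] = truncP (T.getD j [])) := by
  intro js
  induction js with
  | nil =>
    intro tbl used res h1 h2 hul h3
    exact ⟨⟨rfl, rfl⟩, h2, h3⟩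
  | cons j js ih =>
    intro tbl used res h1 h2 hul h3
    have hjT : j < T.length := h1 j List.mem_cons_self
    have h1' : ∀ x ∈ js, x < T.length := fun x hx => h1 x (List.mem_cons_of_mem _ hx)
    have hsafe : SafeP (T.getD j []) := hT _ (getD_mem T [] hjT)
    by_cases hu : used.getD j false
    · have hpred : (!(used.getD j false) && rectB (T.getD j []) &&
          decide (orb b (T.getD j []))) = false := by
        rw [hu]; simp
      simp only [List.filter_cons, hpred, Bool.false_eq_true, if_false]
      have : scanJ b size (j :: js) (tbl, used, res) = scanJ b size js (tbl, used, res) := by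
        simp only [scanJ]
        rw [if_pos hu]
      rw [this]
      exact ih tbl used res h1' h2 hul h3
    · have hun : used.getD j false = false := by simpa using hu
      by_cases hr : RectP (T.getD j [])
      · have hrB : rectB (T.getD j []) = true := (rectB_iff _).mpr hr
        have htbl : tbl.getD j [] = T.getD j [] := by
          rcases h3 j hjT hun with h|h
          · exact h
          · rw [h, trunc_of_rect hr]
        by_cases hm : orb b (T.getD j [])
        · have hpred : (!(used.getD j false) && rectB (T.getD j []) &&
              decide (orb b (T.getD j []))) = true := by
            rw [hun, hrB, decide_eq_true hm]; rfl
          simp only [List.filter_cons, hpred, if_true]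
          have hfst : (tryRots 4 b (tbl.getD j [])).1 = true := by
            rw [htbl, tryRots_fst]; exact decide_eq_true hm
          have hred : scanJ b size (j :: js) (tbl, used, res) =
              (tbl.set j (tryRots 4 b (tbl.getD j [])).2, used.set j true, res + size) := by
            simp only [scanJ]
            rw [if_neg (by rw [hun]; exact Bool.false_ne_true)]
            rw [if_pos hfst]
          rw [hred]
          refine ⟨⟨rfl, rfl⟩, by simpa using h2, ?_⟩
          intro x hx hux
          dsimp only at hux ⊢
          by_cases hxj : x = j
          · subst hxj
            rw [getD_set_self used (by omega) true false] at hux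
            exact absurd hux (by simp)
          · rw [getD_set_ne used (Ne.symm hxj) true false] at hux
            rw [getD_set_ne tbl (Ne.symm hxj) _ []]
            exact h3 x hx hux
        · have hpred : (!(used.getD j false) && rectB (T.getD j []) &&
              decide (orb b (T.getD j []))) = false := by
            rw [hun, decide_eq_false hm, Bool.and_false]
          simp only [List.filter_cons, hpred, Bool.false_eq_true, if_false]
          have hfst : (tryRots 4 b (tbl.getD j [])).1 = false := by
            rw [htbl, tryRots_fst]; exact decide_eq_false hm
          have hsnd : (tryRots 4 b (tbl.getD j [])).2 = T.getD j [] := by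
            rw [htbl, tryRots_snd hsafe b hm, trunc_of_rect hr]
          have hred : scanJ b size (j :: js) (tbl, used, res) =
              scanJ b size js (tbl.set j (T.getD j []), used, res) := by
            simp only [scanJ]
            rw [if_neg (by rw [hun]; exact Bool.false_ne_true)]
            rw [if_neg (by rw [hfst]; exact Bool.false_ne_true), hsnd]
          rw [hred]
          apply ih _ used res h1' (by simpa using h2) hul
          intro x hx hux
          by_cases hxj : x = j
          · subst hxj
            left
            exact getD_set_self tbl (by omega) _ []
          · rw [getD_set_ne tbl (Ne.symm hxj) _ []]
            exact h3 x hx hux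
      · -- non-rectangular (but safe) piece: never matches, state becomes its truncation
        obtain ⟨hne, hnd⟩ := hcb j hjT hr
        have hrB : rectB (T.getD j []) = false := by
          rw [← Bool.not_eq_true, rectB_iff]; exact hr
        have hpred : (!(used.getD j false) && rectB (T.getD j []) &&
            decide (orb b (T.getD j []))) = false := by
          rw [hrB, Bool.and_false, Bool.false_and]
        simp only [List.filter_cons, hpred, Bool.false_eq_true, if_false]
        have hnorb : ¬ orb b (tbl.getD j []) := by
          rcases h3 j hjT hun with h|h
          · rw [h]; exact no_orb_orig hsafe hne hnd
          · rw [h]; exact no_orb_trunc hsafe hnd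
        have hfst : (tryRots 4 b (tbl.getD j [])).1 = false := by
          rw [tryRots_fst]; exact decide_eq_false hnorb
        have hsnd : (tryRots 4 b (tbl.getD j [])).2 = truncP (T.getD j []) := by
          rcases h3 j hjT hun with h|h
          · rw [h, tryRots_snd hsafe b (h ▸ hnorb)]
          · rw [h, tryRots_snd (rect_safe (trunc_rect hsafe)) b (h ▸ hnorb),
              trunc_of_rect (trunc_rect hsafe)]
        have hred : scanJ b size (j :: js) (tbl, used, res) =
            scanJ b size js (tbl.set j (truncP (T.getD j [])), used, res) := by
          simp only [scanJ]
          rw [if_neg (by rw [hun]; exact Bool.false_ne_true)]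
          rw [if_neg (by rw [hfst]; exact Bool.false_ne_true), hsnd]
        rw [hred]
        apply ih _ used res h1' (by simpa using h2) hul
        intro x hx hux
        by_cases hxj : x = j
        · subst hxj
          right
          exact getD_set_self tbl (by omega) _ []
        · rw [getD_set_ne tbl (Ne.symm hxj) _ []]
          exact h3 x hx hux


-- ---- buckets characterization ----
lemma buckets_init (T : List (List (List Int))) :
    ∀ (nn : Nat) (d : PySem.Dict (List (List Int)) (List Nat)) (k : List (List Int)),
    ((List.range nn).foldl
      (fun d j =>
        let t := T.getD j []
        if rectB t then d.modify (keyB t) [] (· ++ [j]) else d) d).getD k [] =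
    d.getD k [] ++ (List.range nn).filter
      (fun j => rectB (T.getD j []) && (keyB (T.getD j []) == k)) := by
  intro nn
  induction nn with
  | zero => simp
  | succ n ih =>
    intro d k
    rw [List.range_succ, List.foldl_append, List.filter_append]
    simp only [List.foldl_cons, List.foldl_nil, List.filter_cons, List.filter_nil]
    by_cases hr : rectB (T.getD n [])
    · rw [if_pos hr, PySem.Dict.getD_modify]
      by_cases hk : k = keyB (T.getD n [])
      · rw [if_pos hk, ih, hk]
        have hb2 : (rectB (T.getD n []) && (keyB (T.getD n []) == keyB (T.getD n []))) = true := by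
          rw [hr, beq_self_eq_true]; rfl
        rw [if_pos hb2, List.append_assoc]
      · rw [if_neg hk, ih]
        have hb2 : (rectB (T.getD n []) && (keyB (T.getD n []) == k)) = false := by
          rw [beq_eq_false_iff_ne.mpr (Ne.symm hk), Bool.and_false]
        rw [if_neg (by rw [hb2]; exact Bool.false_ne_true), List.append_nil]
    · have hrf : rectB (T.getD n []) = false := by simpa using hr
      rw [if_neg hr, ih]
      rw [if_neg (by rw [hrf, Bool.false_and]; exact Bool.false_ne_true), List.append_nil]

-- ---- the main board induction ----
lemma filter_set_true (used : List Bool) (g1 g2 : Nat → Bool) (j0 : Nat)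
    (hj0 : j0 < used.length) (l : List Nat) :
    l.filter (fun j => !((used.set j0 true).getD j false) && g1 j && g2 j) =
    (l.filter (fun j => !(used.getD j false) && g1 j && g2 j)).filter (fun j => !(j == j0)) := by
  rw [List.filter_filter]
  apply List.filter_congr
  intro x _
  by_cases hxj : x = j0
  · subst hxj
    rw [getD_set_self used hj0 true false]
    simp
  · rw [getD_set_ne used (Ne.symm hxj) true false]
    simp [hxj, Bool.and_comm]

lemma main_fold (T : List (List (List Int))) (hT : ∀ t ∈ T, SafeP t) (size : Int) :
    ∀ (board : List (List (List Int))) (tbl : List (List (List Int))) (used : List Bool)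
      (res : Int) (buckets : PySem.Dict (List (List Int)) (List Nat)),
    (∀ bp ∈ board, ∀ j, j < T.length → ¬ RectP (T.getD j []) →
      bp ≠ T.getD j [] ∧ NoDims bp (T.getD j [])) →
    tbl.length = T.length →
    used.length = T.length →
    (∀ j, j < T.length → used.getD j false = false →
      tbl.getD j [] = T.getD j [] ∨ tbl.getD j [] = truncP (T.getD j [])) →
    (∀ k, buckets.getD k [] = (List.range T.length).filter
        (fun j => !(used.getD j false) && rectB (T.getD j []) && (keyB (T.getD j []) == k))) →
    (board.foldl (fun st bp => scanJ bp size (List.range T.length) st) (tbl, used, res)).2.2 =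
    (board.foldl (fun st b =>
        if rectB b then
          match st.1.getD (keyB b) [] with
          | [] => st
          | _ :: tl => (st.1.insert (keyB b) tl, st.2 + size)
        else st)
      (buckets, res)).2 := by
  intro board
  induction board with
  | nil => intro tbl used res buckets _ _ _ _ _; rfl
  | cons b bs ih =>
    intro tbl used res buckets hcross htl hul hinv hb
    simp only [List.foldl_cons]
    obtain ⟨hmatch, hlen', hinv'⟩ :=
      scanJ_char T hT b size (hcross b List.mem_cons_self) (List.range T.length) tbl used res
        (fun j hj => List.mem_range.mp hj) htl hul hinv
    have hcross' : ∀ bp ∈ bs, ∀ j, j < T.length → ¬ RectP (T.getD j []) →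
        bp ≠ T.getD j [] ∧ NoDims bp (T.getD j []) :=
      fun bp hbp => hcross bp (List.mem_cons_of_mem _ hbp)
    rcases hdef : scanJ b size (List.range T.length) (tbl, used, res) with ⟨t', u', r'⟩
    rw [hdef] at hmatch hlen' hinv'
    by_cases hrb : rectB b
    · have hRb : RectP b := (rectB_iff b).mp hrb
      have hpred : ∀ j ∈ List.range T.length,
          (!(used.getD j false) && rectB (T.getD j []) && (keyB (T.getD j []) == keyB b)) =
          (!(used.getD j false) && rectB (T.getD j []) && decide (orb b (T.getD j []))) := by
        intro j hj
        have hjT : j < T.length := List.mem_range.mp hj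
        by_cases hr : RectP (T.getD j [])
        · have e2 : decide (orb b (T.getD j [])) = (keyB (T.getD j []) == keyB b) := by
            by_cases ho : orb b (T.getD j [])
            · have e := ((canon_iff hr b).mp ho).2
              rw [decide_eq_true ho]
              exact (beq_iff_eq.mpr e.symm).symm
            · have hne : keyB (T.getD j []) ≠ keyB b :=
                fun e => ho ((canon_iff hr b).mpr ⟨hRb, e.symm⟩)
              rw [decide_eq_false ho]
              exact (beq_eq_false_iff_ne.mpr hne).symm
          rw [e2]
        · have hrB : rectB (T.getD j []) = false := by
            rw [← Bool.not_eq_true, rectB_iff]; exact hr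
          rw [hrB]
          simp
      have hF : buckets.getD (keyB b) [] =
          (List.range T.length).filter
            (fun j => !(used.getD j false) && rectB (T.getD j []) &&
              decide (orb b (T.getD j []))) := by
        rw [hb (keyB b)]
        exact List.filter_congr hpred
      rcases hcase : (List.range T.length).filter
          (fun j => !(used.getD j false) && rectB (T.getD j []) &&
            decide (orb b (T.getD j []))) with _ | ⟨j0, tl⟩
      · -- no available match
        rw [hcase] at hmatch
        simp only [List.head?_nil] at hmatch
        obtain ⟨hu', hr'⟩ := hmatch
        rw [hu'] at hinv'
        rw [hu', hr']
        simp only [hrb, if_true, hF, hcase]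
        exact ih t' used res buckets hcross' hlen' hul hinv' hb
      · rw [hcase] at hmatch
        simp only [List.head?_cons] at hmatch
        obtain ⟨hu', hr'⟩ := hmatch
        rw [hu'] at hinv'
        rw [hu', hr']
        have hmemF : j0 ∈ (List.range T.length).filter
            (fun j => !(used.getD j false) && rectB (T.getD j []) &&
              decide (orb b (T.getD j []))) := by
          rw [hcase]; exact List.mem_cons_self
        have hj0T : j0 < T.length := List.mem_range.mp (List.mem_filter.mp hmemF).1
        have hp := (List.mem_filter.mp hmemF).2
        have hr0 : RectP (T.getD j0 []) := by
          rcases Bool.and_eq_true_iff.mp hp with ⟨h1, _⟩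
          rcases Bool.and_eq_true_iff.mp h1 with ⟨_, h2⟩
          exact (rectB_iff _).mp h2
        have hkey0 : keyB (T.getD j0 []) = keyB b := by
          have ho : orb b (T.getD j0 []) := by
            rcases Bool.and_eq_true_iff.mp hp with ⟨_, hdec⟩
            exact of_decide_eq_true hdec
          exact ((canon_iff hr0 b).mp ho).2.symm
        have hnd : ((List.range T.length).filter
            (fun j => !(used.getD j false) && rectB (T.getD j []) &&
              decide (orb b (T.getD j [])))).Nodup :=
          List.Nodup.filter _ List.nodup_range
        have hj0tl : j0 ∉ tl := by
          rw [hcase] at hnd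
          exact (List.nodup_cons.mp hnd).1
        simp only [hrb, if_true, hF, hcase]
        apply ih t' (used.set j0 true) (res + size) _ hcross' hlen' (by simpa using hul) hinv'
        intro k
        by_cases hk : k = keyB b
        · subst hk
          rw [PySem.Dict.getD_insert_self]
          rw [filter_set_true used (fun j => rectB (T.getD j []))
            (fun j => keyB (T.getD j []) == keyB b) j0 (by omega)]
          have e : ((List.range T.length).filter
              (fun j => !(used.getD j false) && rectB (T.getD j []) &&
                (keyB (T.getD j []) == keyB b))) = j0 :: tl := by
            rw [List.filter_congr hpred, hcase]
          rw [e]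
          simp only [List.filter_cons]
          rw [if_neg (by simp)]
          symm
          apply List.filter_eq_self.mpr
          intro x hx
          have hne : x ≠ j0 := fun e2 => hj0tl (e2 ▸ hx)
          simp [hne]
        · rw [PySem.Dict.getD_insert_of_ne _ _ _ hk, hb k]
          apply List.filter_congr
          intro x hx
          by_cases hxj : x = j0
          · subst hxj
            rw [hkey0]
            rw [beq_eq_false_iff_ne.mpr (Ne.symm hk)]
            simp
          · rw [getD_set_ne used (Ne.symm hxj) true false]
    · -- rectB b = false: no piece matches
      have hFnil : (List.range T.length).filter
          (fun j => !(used.getD j false) && rectB (T.getD j []) &&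
            decide (orb b (T.getD j []))) = [] := by
        apply List.filter_eq_nil_iff.mpr
        intro j hj
        have hjT : j < T.length := List.mem_range.mp hj
        by_cases hr : RectP (T.getD j [])
        · have hno : ¬ orb b (T.getD j []) := fun ho =>
            hrb ((rectB_iff b).mpr (orb_rect hr ho))
          have hd : (!(used.getD j false) && rectB (T.getD j []) &&
              decide (orb b (T.getD j []))) = false := by
            rw [decide_eq_false hno, Bool.and_false]
          rw [hd]; exact Bool.false_ne_true
        · have hrB : rectB (T.getD j []) = false := by
            rw [← Bool.not_eq_true, rectB_iff]; exact hr
          have hd : (!(used.getD j false) && rectB (T.getD j []) &&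
              decide (orb b (T.getD j []))) = false := by
            rw [hrB, Bool.and_false, Bool.false_and]
          rw [hd]; exact Bool.false_ne_true
      rw [hFnil] at hmatch
      simp only [List.head?_nil] at hmatch
      obtain ⟨hu', hr'⟩ := hmatch
      rw [hu'] at hinv'
      rw [hu', hr']
      simp only [hrb, Bool.false_eq_true, if_false]
      exact ih t' used res buckets hcross' hlen' hul hinv' hb


lemma foldA_nil_range (size : Int) :
    ∀ (board : List (List (List Int))) (st : List (List (List Int)) × List Bool × Int),
    board.foldl (fun st bp => scanJ bp size (List.range 0) st) st = st := by
  intro board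
  induction board with
  | nil => intro st; rfl
  | cons b bs ih =>
    intro st
    obtain ⟨x, y, z⟩ := st
    simpa [List.range_zero, scanJ] using ih (x, y, z)

-- ===== VERDICT (by name: the statement is the Claim_ definition above) =====
theorem check_spec : Claim_equal_check := by
  intro board table size hdom hpre
  show check board table size = check_alt board table size
  by_cases hbd : board = []
  · subst hbd
    simp [check, check_alt]
  by_cases htb : table = []
  · subst htb
    have hmain := main_fold [] (by simp) size board [] [] 0 PySem.Dict.empty
      (by intro bp _ j hj; simp at hj) (by simp) (by simp) (by simp) (by simp)
    rw [show (List.length ([] : List (List (List Int)))) = 0 from rfl] at hmain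
    rw [foldA_nil_range size board ([], [], 0)] at hmain
    simp only [check, check_alt]
    rw [if_pos (Or.inr trivial)]
    exact hmain
  · obtain ⟨hsafe, hcross⟩ : (∀ t ∈ table, SafeP t) ∧
        ∀ bp ∈ board, ∀ t ∈ table, ¬ RectP t → bp ≠ t ∧ NoDims bp t := by
      rcases hpre with h|h|h
      · exact absurd h hbd
      · exact absurd h htb
      · exact h
    simp only [check, check_alt]
    rw [if_neg (by rintro (h|h); exact hbd h; exact htb h)]
    apply main_fold table hsafe size board table (List.replicate table.length false) 0
    · intro bp hbp j hj hnr
      exact hcross bp hbp _ (getD_mem table [] hj) hnr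
    · rfl
    · exact List.length_replicate
    · intro j hj _; exact Or.inl rfl
    · intro k
      rw [buckets_init table table.length PySem.Dict.empty k]
      rw [PySem.Dict.getD_empty, List.nil_append]
      apply List.filter_congr
      intro x hx
      have hxl : x < table.length := List.mem_range.mp hx
      rw [List.getD_replicate _ hxl]
      rfl
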